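-- pv_equiv track=rewrite | github.com/SmitaSMishra/Language-Classification | wiki_english.py | find_truthvalues
-- ===== SOURCE A (Python) =====
-- ANSWERS = ["nl", "it", "en"]
--
-- def find_truthvalues(Examples):
--     du = []
--     it = []
--     en = []
--     for ei in Examples:
--         if ei[len(ei)-1] == ANSWERS[0].lower():
--             du.append(ei)
--         elif ei[len(ei)-1] == ANSWERS[1].lower():
--             it.append(ei)
--         else:
--             en.append(ei)
--     return du, it, en
-- ===== SOURCE B (Python) =====
-- def find_truthvalues(Examples):
--     du = [ei for ei in Examples if ei[-1] == "nl"]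
--     it = [ei for ei in Examples if ei[-1] == "it"]
--     en = [ei for ei in Examples if ei[-1] not in ("nl", "it")]
--     return du, it, en
-- ===== Notes on version B (the rewrite author's own statement) =====
-- stated objective: alternative
-- what changed: Replaces the single accumulate-into-three-lists loop by three independent filtering passes (one comprehension per output list) over Examples.
import Mathlib
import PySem

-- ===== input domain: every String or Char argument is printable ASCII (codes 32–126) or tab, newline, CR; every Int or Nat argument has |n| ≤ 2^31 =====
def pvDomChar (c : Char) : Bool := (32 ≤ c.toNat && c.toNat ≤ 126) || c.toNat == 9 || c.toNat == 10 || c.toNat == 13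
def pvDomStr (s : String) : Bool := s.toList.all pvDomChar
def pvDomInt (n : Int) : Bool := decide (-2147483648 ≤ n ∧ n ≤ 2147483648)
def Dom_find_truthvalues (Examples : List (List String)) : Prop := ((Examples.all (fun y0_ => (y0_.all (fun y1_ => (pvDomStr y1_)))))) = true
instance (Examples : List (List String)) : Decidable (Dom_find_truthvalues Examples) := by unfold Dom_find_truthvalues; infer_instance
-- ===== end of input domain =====

-- B replaces A's single accumulate-into-three-lists loop by three independent filtering passes, one per output list (same cost, different decomposition).


def ANSWERS : List String := ["nl", "it", "en"]

-- ===== PORT A =====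
-- ei[len(ei)-1], total via pyGetD; in range on every input Pre_ admits (ei ≠ [])
def find_truthvalues (Examples : List (List String)) : List (List String) × List (List String) × List (List String) :=
  Examples.foldl (fun s ei =>
    if PySem.List.pyGetD ei ((ei.length : Int) - 1) "" == PySem.Str.lower (PySem.List.pyGetD ANSWERS 0 "") then
      (s.1 ++ [ei], s.2.1, s.2.2)
    else if PySem.List.pyGetD ei ((ei.length : Int) - 1) "" == PySem.Str.lower (PySem.List.pyGetD ANSWERS 1 "") then
      (s.1, s.2.1 ++ [ei], s.2.2)
    else
      (s.1, s.2.1, s.2.2 ++ [ei])) ([], [], [])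

-- ===== PORT B =====
-- ei[-1], total via pyGetD; in range on every input Pre_ admits (ei ≠ [])
def find_truthvalues_alt (Examples : List (List String)) : List (List String) × List (List String) × List (List String) :=
  (Examples.filter (fun ei => PySem.List.pyGetD ei (-1) "" == "nl"),
   Examples.filter (fun ei => PySem.List.pyGetD ei (-1) "" == "it"),
   Examples.filter (fun ei => !(PySem.List.pyGetD ei (-1) "" == "nl" || PySem.List.pyGetD ei (-1) "" == "it")))

-- ===== PRECONDITION & SPEC =====
-- A indexes ei[len(ei)-1], i.e. ei[-1] on an empty ei: IndexError; Pre_ excludes empty inner lists.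
def Pre_find_truthvalues (Examples : List (List String)) : Prop := ∀ ei ∈ Examples, ei ≠ []
instance (Examples : List (List String)) : Decidable (Pre_find_truthvalues Examples) := by unfold Pre_find_truthvalues; infer_instance
def pvWitness_find_truthvalues : List (List String) := [["a", "nl"], ["b", "it"], ["c", "en"], ["d", "xx"]]

def Spec_find_truthvalues (Examples : List (List String)) (out : List (List String) × List (List String) × List (List String)) : Prop := out = find_truthvalues_alt Examples
instance (Examples : List (List String)) (out : List (List String) × List (List String) × List (List String)) : Decidable (Spec_find_truthvalues Examples out) := by unfold Spec_find_truthvalues; infer_instance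

-- ===== CLAIM (what is proved, stated in full; the proofs are below) =====
def Claim_equal_find_truthvalues : Prop := ∀ (Examples : List (List String)), Dom_find_truthvalues Examples → Pre_find_truthvalues Examples → Spec_find_truthvalues Examples (find_truthvalues Examples)

-- ===== LEMMAS AND PROOFS =====

-- under Pre_, the two index expressions agree
theorem pv_idx_eq (ei : List String) (h : ei ≠ []) :
    PySem.List.pyGetD ei ((ei.length : Int) - 1) "" = PySem.List.pyGetD ei (-1) "" := by
  have hlen : 0 < ei.length := List.length_pos_iff.mpr h
  have hc : ((ei.length : Int) - 1) = ((ei.length - 1 : Nat) : Int) := by omega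
  rw [PySem.List.pyGetD_neg_one ei "" h, hc, PySem.List.pyGetD_natCast,
      List.getD_eq_getElem ei "" (by omega), List.getLast_eq_getElem]

-- loop invariant: the fold from any accumulator appends the three filters
theorem pv_fold_inv (Examples : List (List String)) (du it en : List (List String))
    (h : ∀ ei ∈ Examples, ei ≠ []) :
    Examples.foldl (fun s ei =>
      if PySem.List.pyGetD ei ((ei.length : Int) - 1) "" == PySem.Str.lower (PySem.List.pyGetD ANSWERS 0 "") then
        (s.1 ++ [ei], s.2.1, s.2.2)
      else if PySem.List.pyGetD ei ((ei.length : Int) - 1) "" == PySem.Str.lower (PySem.List.pyGetD ANSWERS 1 "") then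
        (s.1, s.2.1 ++ [ei], s.2.2)
      else
        (s.1, s.2.1, s.2.2 ++ [ei])) (du, it, en) =
    (du ++ Examples.filter (fun ei => PySem.List.pyGetD ei (-1) "" == "nl"),
     it ++ Examples.filter (fun ei => PySem.List.pyGetD ei (-1) "" == "it"),
     en ++ Examples.filter (fun ei => !(PySem.List.pyGetD ei (-1) "" == "nl" || PySem.List.pyGetD ei (-1) "" == "it"))) := by
  induction Examples generalizing du it en with
  | nil => simp
  | cons x xs ih =>
    have hx : x ≠ [] := h x (by simp)
    have hxs : ∀ ei ∈ xs, ei ≠ [] := fun ei hm => h ei (by simp [hm])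
    have hANS0 : PySem.Str.lower (PySem.List.pyGetD ANSWERS 0 "") = "nl" := by decide
    have hANS1 : PySem.Str.lower (PySem.List.pyGetD ANSWERS 1 "") = "it" := by decide
    simp only [hANS0, hANS1, beq_iff_eq] at ih
    simp only [List.foldl_cons, pv_idx_eq x hx, hANS0, hANS1, beq_iff_eq]
    by_cases h0 : PySem.List.pyGetD x (-1) "" = "nl"
    · rw [if_pos h0, ih _ _ _ hxs]
      simp [h0]
    · by_cases h1 : PySem.List.pyGetD x (-1) "" = "it"
      · rw [if_neg h0, if_pos h1, ih _ _ _ hxs]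
        simp [h0, h1]
      · rw [if_neg h0, if_neg h1, ih _ _ _ hxs]
        simp [h0, h1]

-- ===== VERDICT (by name: the statement is the Claim_ definition above) =====
theorem find_truthvalues_spec : Claim_equal_find_truthvalues := by
  intro Examples _ hpre
  unfold Spec_find_truthvalues find_truthvalues find_truthvalues_alt
  simpa using pv_fold_inv Examples [] [] [] hpre
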